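-- pv_equiv track=rewrite | github.com/nemon63/3D-viewer | viewer/services/pipeline_validation.py | _is_channel_present
-- ===== SOURCE A (Python) =====
-- def _is_channel_present(channel: str, presence: dict) -> bool:
--     ch = str(channel).strip().lower()
--     if ch == "orm":
--         return bool(presence.get("orm")) or _has_orm_components(presence)
--     if ch == "mask_map":
--         return bool(presence.get("mask_map")) or _has_mask_map_components(presence)
--     if ch in ("smoothness", "gloss"):
--         return bool(presence.get("smoothness") or presence.get("gloss") or presence.get("roughness") or presence.get("rough"))
--     if ch in ("emissive", "emission"):
--         return bool(presence.get("emissive") or presence.get("emission"))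
--     if ch in ("height", "displacement"):
--         return bool(presence.get("height") or presence.get("displacement"))
--     aliases = {
--         "basecolor": ("basecolor", "diffuse", "albedo"),
--         "diffuse": ("diffuse", "basecolor", "albedo"),
--         "albedo": ("albedo", "basecolor", "diffuse"),
--         "roughness": ("roughness", "rough"),
--         "rough": ("rough", "roughness"),
--         "smoothness": ("smoothness", "gloss", "roughness", "rough"),
--         "gloss": ("gloss", "smoothness", "roughness", "rough"),
--         "metallic": ("metallic", "metal"),
--         "metal": ("metal", "metallic"),
--         "occlusion": ("occlusion", "ao"),
--         "ao": ("ao", "occlusion"),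
--         "emissive": ("emissive", "emission"),
--         "emission": ("emission", "emissive"),
--         "height": ("height", "displacement"),
--         "displacement": ("displacement", "height"),
--         "detail_mask": ("detail_mask",),
--     }
--     keys = aliases.get(ch, (ch,))
--     return any(bool(presence.get(k)) for k in keys)
--
-- def _has_orm_components(presence: dict) -> bool:
--     has_occ = bool(presence.get("occlusion") or presence.get("ao"))
--     has_rough = bool(presence.get("roughness") or presence.get("rough"))
--     has_metal = bool(presence.get("metallic") or presence.get("metal"))
--     return has_occ and has_rough and has_metal
--
-- def _has_mask_map_components(presence: dict) -> bool:
--     has_occ = bool(presence.get("occlusion") or presence.get("ao"))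
--     has_metal = bool(presence.get("metallic") or presence.get("metal"))
--     has_smooth = bool(presence.get("smoothness") or presence.get("gloss") or presence.get("roughness") or presence.get("rough"))
--     return has_occ and has_metal and has_smooth
-- ===== SOURCE B (Python) =====
-- # Declarative spec table: channel -> tuple of satisfaction specs; each spec is a
-- # tuple of alias groups; present iff some spec has every group hit.
-- _OCC = ("occlusion", "ao")
-- _ROUGH = ("roughness", "rough")
-- _METAL = ("metallic", "metal")
-- _SMOOTH = ("smoothness", "gloss", "roughness", "rough")
-- _EMIT = ("emissive", "emission")
-- _HEIGHT = ("height", "displacement")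
-- _COLOR = ("basecolor", "diffuse", "albedo")
--
-- _SPECS = {
--     "basecolor": ((_COLOR,),),
--     "diffuse": ((_COLOR,),),
--     "albedo": ((_COLOR,),),
--     "roughness": ((_ROUGH,),),
--     "rough": ((_ROUGH,),),
--     "smoothness": ((_SMOOTH,),),
--     "gloss": ((_SMOOTH,),),
--     "metallic": ((_METAL,),),
--     "metal": ((_METAL,),),
--     "occlusion": ((_OCC,),),
--     "ao": ((_OCC,),),
--     "emissive": ((_EMIT,),),
--     "emission": ((_EMIT,),),
--     "height": ((_HEIGHT,),),
--     "displacement": ((_HEIGHT,),),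
--     "detail_mask": ((("detail_mask",),),),
--     "orm": ((("orm",),), (_OCC, _ROUGH, _METAL)),
--     "mask_map": ((("mask_map",),), (_OCC, _METAL, _SMOOTH)),
-- }
--
-- def _is_channel_present(channel: str, presence: dict) -> bool:
--     ch = str(channel).strip().lower()
--     specs = _SPECS.get(ch, (((ch,),),))
--     return any(
--         all(any(bool(presence.get(k)) for k in group) for group in spec)
--         for spec in specs
--     )
-- ===== Notes on version B (the rewrite author's own statement) =====
-- stated objective: simpler
-- what changed: Replaced the if-chain over special-cased channels plus an aliases dict and two component-checking helpers by one declarative table mapping each channel to satisfaction specs (any spec with all its alias-groups hit), evaluated by a single any/all/any comprehension.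
import Mathlib
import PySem

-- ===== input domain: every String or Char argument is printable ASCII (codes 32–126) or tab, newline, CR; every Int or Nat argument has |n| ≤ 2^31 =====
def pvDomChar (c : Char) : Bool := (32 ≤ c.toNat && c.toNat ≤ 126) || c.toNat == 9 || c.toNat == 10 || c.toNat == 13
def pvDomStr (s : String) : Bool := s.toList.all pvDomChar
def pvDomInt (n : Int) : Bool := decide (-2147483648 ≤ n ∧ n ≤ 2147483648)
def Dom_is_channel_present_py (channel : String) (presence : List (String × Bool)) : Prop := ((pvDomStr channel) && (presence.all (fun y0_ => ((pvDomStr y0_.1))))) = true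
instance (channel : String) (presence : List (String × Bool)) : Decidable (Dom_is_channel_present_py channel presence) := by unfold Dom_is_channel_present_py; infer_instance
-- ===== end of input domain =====

-- B replaces A's if-chain + aliases dict + two component helpers by one declarative
-- spec table evaluated with any/all/any; same result, simpler decomposition.

-- ===== PORT A =====
-- bool(presence.get(k)) : first-match lookup, None → False
def pvA_get (presence : List (String × Bool)) (k : String) : Bool :=
  ((PySem.Dict.mk presence).get? k).getD false

def pvA_has_orm_components (presence : List (String × Bool)) : Bool :=
  let has_occ := pvA_get presence "occlusion" || pvA_get presence "ao"
  let has_rough := pvA_get presence "roughness" || pvA_get presence "rough"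
  let has_metal := pvA_get presence "metallic" || pvA_get presence "metal"
  has_occ && has_rough && has_metal

def pvA_has_mask_map_components (presence : List (String × Bool)) : Bool :=
  let has_occ := pvA_get presence "occlusion" || pvA_get presence "ao"
  let has_metal := pvA_get presence "metallic" || pvA_get presence "metal"
  let has_smooth := pvA_get presence "smoothness" || pvA_get presence "gloss" ||
    pvA_get presence "roughness" || pvA_get presence "rough"
  has_occ && has_metal && has_smooth

def pvA_aliases : PySem.Dict String (List String) := PySem.Dict.ofList [
      ("basecolor", ["basecolor", "diffuse", "albedo"]),
      ("diffuse", ["diffuse", "basecolor", "albedo"]),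
      ("albedo", ["albedo", "basecolor", "diffuse"]),
      ("roughness", ["roughness", "rough"]),
      ("rough", ["rough", "roughness"]),
      ("smoothness", ["smoothness", "gloss", "roughness", "rough"]),
      ("gloss", ["gloss", "smoothness", "roughness", "rough"]),
      ("metallic", ["metallic", "metal"]),
      ("metal", ["metal", "metallic"]),
      ("occlusion", ["occlusion", "ao"]),
      ("ao", ["ao", "occlusion"]),
      ("emissive", ["emissive", "emission"]),
      ("emission", ["emission", "emissive"]),
      ("height", ["height", "displacement"]),
      ("displacement", ["displacement", "height"]),
      ("detail_mask", ["detail_mask"])]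


def pvA_core (ch : String) (presence : List (String × Bool)) : Bool :=
  if ch == "orm" then pvA_get presence "orm" || pvA_has_orm_components presence
  else if ch == "mask_map" then pvA_get presence "mask_map" || pvA_has_mask_map_components presence
  else if ch == "smoothness" || ch == "gloss" then
    pvA_get presence "smoothness" || pvA_get presence "gloss" ||
    pvA_get presence "roughness" || pvA_get presence "rough"
  else if ch == "emissive" || ch == "emission" then
    pvA_get presence "emissive" || pvA_get presence "emission"
  else if ch == "height" || ch == "displacement" then
    pvA_get presence "height" || pvA_get presence "displacement"
  else
    let keys := (pvA_aliases.get? ch).getD [ch]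
    keys.any (fun k => pvA_get presence k)

def is_channel_present_py (channel : String) (presence : List (String × Bool)) : Bool :=
  pvA_core (PySem.Str.lower (PySem.Str.strip channel)) presence

-- ===== PORT B =====
def pvB_get (presence : List (String × Bool)) (k : String) : Bool :=
  ((PySem.Dict.mk presence).get? k).getD false

def pvB_occ : List String := ["occlusion", "ao"]
def pvB_rough : List String := ["roughness", "rough"]
def pvB_metal : List String := ["metallic", "metal"]
def pvB_smooth : List String := ["smoothness", "gloss", "roughness", "rough"]
def pvB_emit : List String := ["emissive", "emission"]
def pvB_height : List String := ["height", "displacement"]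
def pvB_color : List String := ["basecolor", "diffuse", "albedo"]

def pvB_specs : PySem.Dict String (List (List (List String))) := PySem.Dict.ofList [
  ("basecolor", [[pvB_color]]),
  ("diffuse", [[pvB_color]]),
  ("albedo", [[pvB_color]]),
  ("roughness", [[pvB_rough]]),
  ("rough", [[pvB_rough]]),
  ("smoothness", [[pvB_smooth]]),
  ("gloss", [[pvB_smooth]]),
  ("metallic", [[pvB_metal]]),
  ("metal", [[pvB_metal]]),
  ("occlusion", [[pvB_occ]]),
  ("ao", [[pvB_occ]]),
  ("emissive", [[pvB_emit]]),
  ("emission", [[pvB_emit]]),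
  ("height", [[pvB_height]]),
  ("displacement", [[pvB_height]]),
  ("detail_mask", [[["detail_mask"]]]),
  ("orm", [[["orm"]], [pvB_occ, pvB_rough, pvB_metal]]),
  ("mask_map", [[["mask_map"]], [pvB_occ, pvB_metal, pvB_smooth]])]

def is_channel_present_py_alt (channel : String) (presence : List (String × Bool)) : Bool :=
  let ch := PySem.Str.lower (PySem.Str.strip channel)
  let specs := (pvB_specs.get? ch).getD [[[ch]]]
  specs.any (fun spec => spec.all (fun group => group.any (fun k => pvB_get presence k)))

-- ===== PRECONDITION & SPEC =====
def Spec_is_channel_present_py (channel : String) (presence : List (String × Bool)) (out : Bool) : Prop := out = is_channel_present_py_alt channel presence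
instance (channel : String) (presence : List (String × Bool)) (out : Bool) : Decidable (Spec_is_channel_present_py channel presence out) := by unfold Spec_is_channel_present_py; infer_instance

-- ===== CLAIM (what is proved, stated in full; the proofs are below) =====
def Claim_equal_is_channel_present_py : Prop := ∀ (channel : String) (presence : List (String × Bool)), Dom_is_channel_present_py channel presence → Spec_is_channel_present_py channel presence (is_channel_present_py channel presence)

-- ===== LEMMAS AND PROOFS =====

theorem core_eq (ch : String) (presence : List (String × Bool)) :
    pvA_core ch presence =
    ((pvB_specs.get? ch).getD [[[ch]]]).any
      (fun spec => spec.all (fun group => group.any (fun k => pvB_get presence k))) := by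
  have hgb : pvB_get = pvA_get := rfl
  by_cases h0 : ch = "orm"
  · subst h0
    simp [pvA_core, pvA_has_orm_components, hgb,
      show pvB_specs.get? "orm" = some [[["orm"]], [["occlusion", "ao"], ["roughness", "rough"], ["metallic", "metal"]]] from rfl]
    all_goals (generalize pvA_get presence "orm" = x0; generalize pvA_get presence "occlusion" = x1; generalize pvA_get presence "ao" = x2; generalize pvA_get presence "roughness" = x3; generalize pvA_get presence "rough" = x4; generalize pvA_get presence "metallic" = x5; generalize pvA_get presence "metal" = x6; revert x0 x1 x2 x3 x4 x5 x6; decide)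
  by_cases h1 : ch = "mask_map"
  · subst h1
    simp [pvA_core, pvA_has_mask_map_components, hgb,
      show pvB_specs.get? "mask_map" = some [[["mask_map"]], [["occlusion", "ao"], ["metallic", "metal"], ["smoothness", "gloss", "roughness", "rough"]]] from rfl]
    all_goals (generalize pvA_get presence "mask_map" = x0; generalize pvA_get presence "occlusion" = x1; generalize pvA_get presence "ao" = x2; generalize pvA_get presence "metallic" = x3; generalize pvA_get presence "metal" = x4; generalize pvA_get presence "smoothness" = x5; generalize pvA_get presence "gloss" = x6; generalize pvA_get presence "roughness" = x7; generalize pvA_get presence "rough" = x8; revert x0 x1 x2 x3 x4 x5 x6 x7 x8; decide)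
  by_cases h2 : ch = "smoothness"
  · subst h2
    simp [pvA_core, hgb,
      show pvB_specs.get? "smoothness" = some [[["smoothness", "gloss", "roughness", "rough"]]] from rfl]
    all_goals (generalize pvA_get presence "smoothness" = x0; generalize pvA_get presence "gloss" = x1; generalize pvA_get presence "roughness" = x2; generalize pvA_get presence "rough" = x3; revert x0 x1 x2 x3; decide)
  by_cases h3 : ch = "gloss"
  · subst h3
    simp [pvA_core, hgb,
      show pvB_specs.get? "gloss" = some [[["smoothness", "gloss", "roughness", "rough"]]] from rfl]
    all_goals (generalize pvA_get presence "smoothness" = x0; generalize pvA_get presence "gloss" = x1; generalize pvA_get presence "roughness" = x2; generalize pvA_get presence "rough" = x3; revert x0 x1 x2 x3; decide)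
  by_cases h4 : ch = "emissive"
  · subst h4
    simp [pvA_core, hgb,
      show pvB_specs.get? "emissive" = some [[["emissive", "emission"]]] from rfl]
  by_cases h5 : ch = "emission"
  · subst h5
    simp [pvA_core, hgb,
      show pvB_specs.get? "emission" = some [[["emissive", "emission"]]] from rfl]
  by_cases h6 : ch = "height"
  · subst h6
    simp [pvA_core, hgb,
      show pvB_specs.get? "height" = some [[["height", "displacement"]]] from rfl]
  by_cases h7 : ch = "displacement"
  · subst h7
    simp [pvA_core, hgb,
      show pvB_specs.get? "displacement" = some [[["height", "displacement"]]] from rfl]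
  by_cases h8 : ch = "basecolor"
  · subst h8
    simp [pvA_core, hgb,
      show pvB_specs.get? "basecolor" = some [[["basecolor", "diffuse", "albedo"]]] from rfl,
      show pvA_aliases.get? "basecolor" = some ["basecolor", "diffuse", "albedo"] from rfl]
  by_cases h9 : ch = "diffuse"
  · subst h9
    simp [pvA_core, hgb,
      show pvB_specs.get? "diffuse" = some [[["basecolor", "diffuse", "albedo"]]] from rfl,
      show pvA_aliases.get? "diffuse" = some ["diffuse", "basecolor", "albedo"] from rfl]
    all_goals (generalize pvA_get presence "diffuse" = x0; generalize pvA_get presence "basecolor" = x1; generalize pvA_get presence "albedo" = x2; revert x0 x1 x2; decide)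
  by_cases h10 : ch = "albedo"
  · subst h10
    simp [pvA_core, hgb,
      show pvB_specs.get? "albedo" = some [[["basecolor", "diffuse", "albedo"]]] from rfl,
      show pvA_aliases.get? "albedo" = some ["albedo", "basecolor", "diffuse"] from rfl]
    all_goals (generalize pvA_get presence "albedo" = x0; generalize pvA_get presence "basecolor" = x1; generalize pvA_get presence "diffuse" = x2; revert x0 x1 x2; decide)
  by_cases h11 : ch = "roughness"
  · subst h11
    simp [pvA_core, hgb,
      show pvB_specs.get? "roughness" = some [[["roughness", "rough"]]] from rfl,
      show pvA_aliases.get? "roughness" = some ["roughness", "rough"] from rfl]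
  by_cases h12 : ch = "rough"
  · subst h12
    simp [pvA_core, hgb,
      show pvB_specs.get? "rough" = some [[["roughness", "rough"]]] from rfl,
      show pvA_aliases.get? "rough" = some ["rough", "roughness"] from rfl]
    all_goals (generalize pvA_get presence "rough" = x0; generalize pvA_get presence "roughness" = x1; revert x0 x1; decide)
  by_cases h13 : ch = "metallic"
  · subst h13
    simp [pvA_core, hgb,
      show pvB_specs.get? "metallic" = some [[["metallic", "metal"]]] from rfl,
      show pvA_aliases.get? "metallic" = some ["metallic", "metal"] from rfl]
  by_cases h14 : ch = "metal"
  · subst h14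
    simp [pvA_core, hgb,
      show pvB_specs.get? "metal" = some [[["metallic", "metal"]]] from rfl,
      show pvA_aliases.get? "metal" = some ["metal", "metallic"] from rfl]
    all_goals (generalize pvA_get presence "metal" = x0; generalize pvA_get presence "metallic" = x1; revert x0 x1; decide)
  by_cases h15 : ch = "occlusion"
  · subst h15
    simp [pvA_core, hgb,
      show pvB_specs.get? "occlusion" = some [[["occlusion", "ao"]]] from rfl,
      show pvA_aliases.get? "occlusion" = some ["occlusion", "ao"] from rfl]
  by_cases h16 : ch = "ao"
  · subst h16
    simp [pvA_core, hgb,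
      show pvB_specs.get? "ao" = some [[["occlusion", "ao"]]] from rfl,
      show pvA_aliases.get? "ao" = some ["ao", "occlusion"] from rfl]
    all_goals (generalize pvA_get presence "ao" = x0; generalize pvA_get presence "occlusion" = x1; revert x0 x1; decide)
  by_cases h17 : ch = "detail_mask"
  · subst h17
    simp [pvA_core, hgb,
      show pvB_specs.get? "detail_mask" = some [[["detail_mask"]]] from rfl,
      show pvA_aliases.get? "detail_mask" = some ["detail_mask"] from rfl]
  · have hbn : pvB_specs.get? ch = none := by
      rw [PySem.Dict.get?_eq_none_iff_not_mem_keys]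
      have hk : pvB_specs.keys = ["basecolor", "diffuse", "albedo", "roughness", "rough", "smoothness", "gloss", "metallic", "metal", "occlusion", "ao", "emissive", "emission", "height", "displacement", "detail_mask", "orm", "mask_map"] := rfl
      rw [hk]; simp [h0, h1, h2, h3, h4, h5, h6, h7, h8, h9, h10, h11, h12, h13, h14, h15, h16, h17]
    have han : pvA_aliases.get? ch = none := by
      rw [PySem.Dict.get?_eq_none_iff_not_mem_keys]
      have hk : pvA_aliases.keys = ["basecolor", "diffuse", "albedo", "roughness", "rough", "smoothness", "gloss", "metallic", "metal", "occlusion", "ao", "emissive", "emission", "height", "displacement", "detail_mask"] := rfl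
      rw [hk]; simp [h2, h3, h4, h5, h6, h7, h8, h9, h10, h11, h12, h13, h14, h15, h16, h17]
    simp [pvA_core, hbn, han, hgb,
      show (ch == "orm") = false from beq_eq_false_iff_ne.mpr h0,
      show (ch == "mask_map") = false from beq_eq_false_iff_ne.mpr h1,
      show (ch == "smoothness") = false from beq_eq_false_iff_ne.mpr h2,
      show (ch == "gloss") = false from beq_eq_false_iff_ne.mpr h3,
      show (ch == "emissive") = false from beq_eq_false_iff_ne.mpr h4,
      show (ch == "emission") = false from beq_eq_false_iff_ne.mpr h5,
      show (ch == "height") = false from beq_eq_false_iff_ne.mpr h6,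
      show (ch == "displacement") = false from beq_eq_false_iff_ne.mpr h7]


-- ===== VERDICT (by name: the statement is the Claim_ definition above) =====
theorem is_channel_present_py_spec : Claim_equal_is_channel_present_py := by
  intro channel presence _
  unfold Spec_is_channel_present_py is_channel_present_py is_channel_present_py_alt
  exact core_eq _ presence
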